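-- pv_equiv track=rewrite | github.com/ashgillman/2048 | main.py | collapse_board
-- ===== SOURCE A (Python) =====
-- N = 4
--
-- def collapse_board(board):
--     new_board = []
--     for row in board:
--         new_row = []
--         elem_last = 0
--         for elem in row:
--             if elem != 0:
--                 if elem == elem_last:
--                     new_row[-1] = 2 * elem
--                     elem_last = 0  # reset
--                 else:
--                     new_row.append(elem)
--                     elem_last = elem
--         new_row.extend([0] * (N - len(new_row)))
--         new_board.append(new_row)
--     return new_board
-- ===== SOURCE B (Python) =====
-- N = 4
--
-- def collapse_board(board):
--     new_board = []
--     for row in board: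
--         nums = [x for x in row if x != 0]
--         merged = []
--         i = 0
--         while i < len(nums):
--             if i + 1 < len(nums) and nums[i] == nums[i + 1]:
--                 merged.append(2 * nums[i])
--                 i += 2
--             else:
--                 merged.append(nums[i])
--                 i += 1
--         merged += [0] * (N - len(merged))
--         new_board.append(merged)
--     return new_board
-- ===== Notes on version B (the rewrite author's own statement) =====
-- stated objective: simpler
-- what changed: Replaces A's single fused pass with an elem_last sentinel and in-place last-element overwrite by two plain passes per row: compact out zeros, then merge adjacent equal pairs left-to-right with a two-step index walk, then pad with zeros.
import Mathlib
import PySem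

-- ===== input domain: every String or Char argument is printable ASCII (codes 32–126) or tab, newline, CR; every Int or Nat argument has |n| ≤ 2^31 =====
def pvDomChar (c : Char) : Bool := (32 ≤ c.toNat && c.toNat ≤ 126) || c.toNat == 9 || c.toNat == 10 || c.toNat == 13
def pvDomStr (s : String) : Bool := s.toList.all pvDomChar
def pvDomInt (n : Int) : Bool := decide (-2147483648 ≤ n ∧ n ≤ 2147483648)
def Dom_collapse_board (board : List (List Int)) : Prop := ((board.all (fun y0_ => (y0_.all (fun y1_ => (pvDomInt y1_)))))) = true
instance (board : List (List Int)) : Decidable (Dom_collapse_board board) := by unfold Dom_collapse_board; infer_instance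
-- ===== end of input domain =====

-- B replaces A's fused sentinel pass by two plain passes per row (drop zeros, then merge
-- adjacent equal pairs), same output; objective: simpler.

-- ===== PORT A =====
-- one iteration of A's inner loop: state = (new_row, elem_last)
def collapseStepA (st : List Int × Int) (elem : Int) : List Int × Int :=
  if elem ≠ 0 then
    if elem = st.2 then (st.1.dropLast ++ [2 * elem], 0)
    else (st.1 ++ [elem], elem)
  else st

def collapse_board (board : List (List Int)) : List (List Int) :=
  board.map (fun row =>
    let new_row := (row.foldl collapseStepA ([], 0)).1
    new_row ++ List.replicate (4 - new_row.length) 0)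

-- ===== PORT B =====
-- B's index walk over the compacted row: take two when equal, else one
def mergePairs : List Int → List Int
  | a :: b :: rest => if a = b then 2 * a :: mergePairs rest else a :: mergePairs (b :: rest)
  | l => l

def collapse_board_alt (board : List (List Int)) : List (List Int) :=
  board.map (fun row =>
    let merged := mergePairs (row.filter (fun x => x != 0))
    merged ++ List.replicate (4 - merged.length) 0)

-- ===== PRECONDITION & SPEC =====
def Spec_collapse_board (board : List (List Int)) (out : List (List Int)) : Prop := out = collapse_board_alt board
instance (board : List (List Int)) (out : List (List Int)) : Decidable (Spec_collapse_board board out) := by unfold Spec_collapse_board; infer_instance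

-- ===== CLAIM (what is proved, stated in full; the proofs are below) =====
def Claim_equal_collapse_board : Prop := ∀ (board : List (List Int)), Dom_collapse_board board → Spec_collapse_board board (collapse_board board)

-- ===== LEMMAS AND PROOFS =====

-- A's step ignores zeros, so folding over the row equals folding over its nonzero part
lemma foldl_filter_nz (row : List Int) (st : List Int × Int) :
    row.foldl collapseStepA st = (row.filter (fun x => x != 0)).foldl collapseStepA st := by
  induction row generalizing st with
  | nil => rfl
  | cons a l ih =>
    by_cases h : a = 0
    · subst h
      simp [List.filter, collapseStepA, ih]
    · have : (a != 0) = true := by simpa using h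
      simp [List.filter, this, List.foldl, ih]

-- combined invariant for A's inner loop on a zero-free list
lemma foldA_merge :
    ∀ n (l : List Int), l.length ≤ n → (∀ x ∈ l, x ≠ 0) →
      (∀ acc : List Int, (l.foldl collapseStepA (acc, 0)).1 = acc ++ mergePairs l) ∧
      (∀ (acc : List Int) (a : Int), a ≠ 0 →
        (l.foldl collapseStepA (acc ++ [a], a)).1 = acc ++ mergePairs (a :: l)) := by
  intro n
  induction n with
  | zero =>
    intro l hl _
    have : l = [] := List.eq_nil_of_length_eq_zero (Nat.le_zero.mp hl)
    subst this
    exact ⟨fun acc => by simp [mergePairs], fun acc a _ => by simp [mergePairs]⟩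
  | succ n ih =>
    intro l hl hnz
    cases l with
    | nil => exact ⟨fun acc => by simp [mergePairs], fun acc a _ => by simp [mergePairs]⟩
    | cons b l' =>
      have hb : b ≠ 0 := hnz b (by simp)
      have hnz' : ∀ x ∈ l', x ≠ 0 := fun x hx => hnz x (by simp [hx])
      have hl' : l'.length ≤ n := by simpa using Nat.le_of_succ_le_succ hl
      have IH := ih l' hl' hnz'
      constructor
      · intro acc
        have step : collapseStepA (acc, 0) b = (acc ++ [b], b) := by
          simp [collapseStepA, hb]
        calc ((b :: l').foldl collapseStepA (acc, 0)).1
            = (l'.foldl collapseStepA (acc ++ [b], b)).1 := by simp [List.foldl, step]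
          _ = acc ++ mergePairs (b :: l') := IH.2 acc b hb
      · intro acc a ha
        by_cases hab : b = a
        · subst hab
          have step : collapseStepA (acc ++ [b], b) b = (acc ++ [2 * b], 0) := by
            simp [collapseStepA, hb]
          calc ((b :: l').foldl collapseStepA (acc ++ [b], b)).1
              = (l'.foldl collapseStepA (acc ++ [2 * b], 0)).1 := by simp [List.foldl, step]
            _ = (acc ++ [2 * b]) ++ mergePairs l' := IH.1 (acc ++ [2 * b])
            _ = acc ++ mergePairs (b :: b :: l') := by simp [mergePairs]
        · have step : collapseStepA (acc ++ [a], a) b = ((acc ++ [a]) ++ [b], b) := by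
            simp [collapseStepA, hb, hab]
          calc ((b :: l').foldl collapseStepA (acc ++ [a], a)).1
              = (l'.foldl collapseStepA ((acc ++ [a]) ++ [b], b)).1 := by simp [List.foldl, step]
            _ = (acc ++ [a]) ++ mergePairs (b :: l') := IH.2 (acc ++ [a]) b hb
            _ = acc ++ mergePairs (a :: b :: l') := by
                have : a ≠ b := fun h => hab h.symm
                simp [mergePairs, this]

lemma row_eq (row : List Int) :
    (row.foldl collapseStepA ([], 0)).1 = mergePairs (row.filter (fun x => x != 0)) := by
  rw [foldl_filter_nz]
  have hnz : ∀ x ∈ row.filter (fun x => x != 0), x ≠ 0 := by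
    intro x hx
    have := List.of_mem_filter hx
    simpa using this
  simpa using (foldA_merge (row.filter (fun x => x != 0)).length _ le_rfl hnz).1 []

-- ===== VERDICT (by name: the statement is the Claim_ definition above) =====
theorem collapse_board_spec : Claim_equal_collapse_board := by
  intro board _
  unfold Spec_collapse_board collapse_board collapse_board_alt
  refine List.map_congr_left ?_
  intro row _
  simp only [row_eq]
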